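-- pv_equiv track=rewrite | github.com/posl/comment_recommendation | script/mod_gen/4_time/zh/162_B/4.py | solve
-- ===== SOURCE A (Python) =====
-- def solve(N):
--     sum = 0
--     for i in range(1, N+1):
--         if i % 3 == 0 and i % 5 == 0:
--             continue
--         elif i % 3 == 0:
--             continue
--         elif i % 5 == 0:
--             continue
--         else:
--             sum += i
--     return sum
-- ===== SOURCE B (Python) =====
-- def solve(N):
--     def tri(k):
--         return k * (k + 1) // 2
--     n = N if N > 0 else 0
--     return tri(n) - 3 * tri(n // 3) - 5 * tri(n // 5) + 15 * tri(n // 15)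
-- ===== Notes on version B (the rewrite author's own statement) =====
-- stated objective: faster
-- what changed: Replaced the O(N) loop with an O(1) inclusion-exclusion closed form using the arithmetic-series formula.
import Mathlib
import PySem

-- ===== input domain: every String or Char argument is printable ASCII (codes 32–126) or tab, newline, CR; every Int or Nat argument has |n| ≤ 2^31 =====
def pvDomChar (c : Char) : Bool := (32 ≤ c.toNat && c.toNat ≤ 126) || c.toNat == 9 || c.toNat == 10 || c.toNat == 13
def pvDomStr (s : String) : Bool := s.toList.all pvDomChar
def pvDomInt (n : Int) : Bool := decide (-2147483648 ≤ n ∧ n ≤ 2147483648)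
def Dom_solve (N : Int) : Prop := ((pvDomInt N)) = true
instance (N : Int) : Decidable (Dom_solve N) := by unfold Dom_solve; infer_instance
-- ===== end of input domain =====

-- B replaces A's O(N) loop by an O(1) inclusion-exclusion closed form (asymptotically faster).

-- ===== PORT A =====
def solve (N : Int) : Int :=
  (PySem.List.pyRange 1 (N + 1) 1).foldl (fun sum i =>
    if PySem.Int.mod i 3 = 0 ∧ PySem.Int.mod i 5 = 0 then sum
    else if PySem.Int.mod i 3 = 0 then sum
    else if PySem.Int.mod i 5 = 0 then sum
    else sum + i) 0

-- ===== PORT B =====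
def solveTri (k : Int) : Int := PySem.Int.floordiv (k * (k + 1)) 2

def solve_alt (N : Int) : Int :=
  let n := if N > 0 then N else 0
  solveTri n - 3 * solveTri (PySem.Int.floordiv n 3)
    - 5 * solveTri (PySem.Int.floordiv n 5)
    + 15 * solveTri (PySem.Int.floordiv n 15)

-- ===== PRECONDITION & SPEC =====
def Spec_solve (N : Int) (out : Int) : Prop := out = solve_alt N
instance (N : Int) (out : Int) : Decidable (Spec_solve N out) := by unfold Spec_solve; infer_instance

-- ===== CLAIM (what is proved, stated in full; the proofs are below) =====
def Claim_equal_solve : Prop := ∀ (N : Int), Dom_solve N → Spec_solve N (solve N)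

-- ===== LEMMAS AND PROOFS =====

-- triangular numbers by Euclidean division (equal to solveTri on its uses, where everything is ≥ 0)
def triE (k : Int) : Int := k * (k + 1) / 2

theorem triE_succ (a : Int) : triE (a + 1) = triE a + (a + 1) := by
  unfold triE
  have h : (a + 1) * (a + 1 + 1) = a * (a + 1) + (a + 1) * 2 := by ring
  rw [h, Int.add_mul_ediv_right _ _ (by norm_num : (2:Int) ≠ 0)]

-- the closed form, via Euclidean division
def F (k : Int) : Int := triE k - 3 * triE (k / 3) - 5 * triE (k / 5) + 15 * triE (k / 15)

theorem F_succ (k : Int) :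
    F (k + 1) = F k + (if ¬((k + 1) % 3 = 0 ∧ (k + 1) % 5 = 0) ∧ ¬(k + 1) % 3 = 0 ∧ ¬(k + 1) % 5 = 0
      then k + 1 else 0) := by
  unfold F
  have hm3 : ((k + 1) % 15) % 3 = (k + 1) % 3 := Int.emod_emod_of_dvd _ (by norm_num)
  have hm5 : ((k + 1) % 15) % 5 = (k + 1) % 5 := Int.emod_emod_of_dvd _ (by norm_num)
  by_cases h3 : (k + 1) % 3 = 0 <;> by_cases h5 : (k + 1) % 5 = 0
  · have e3 : (k + 1) / 3 = k / 3 + 1 := by omega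
    have e5 : (k + 1) / 5 = k / 5 + 1 := by omega
    have e15 : (k + 1) / 15 = k / 15 + 1 := by omega
    rw [e3, e5, e15, triE_succ, triE_succ, triE_succ, triE_succ]
    simp only [h3, h5]
    simp only [and_self, not_true_eq_false, if_false]
    omega
  · have e3 : (k + 1) / 3 = k / 3 + 1 := by omega
    have e5 : (k + 1) / 5 = k / 5 := by omega
    have h15 : (k + 1) % 15 ≠ 0 := fun h => h5 (by rw [← hm5, h]; norm_num)
    have e15 : (k + 1) / 15 = k / 15 := by omega
    rw [e3, e5, e15, triE_succ, triE_succ]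
    simp only [h3, h5]
    simp only [not_true_eq_false, false_and, and_false, if_false]
    omega
  · have e3 : (k + 1) / 3 = k / 3 := by omega
    have e5 : (k + 1) / 5 = k / 5 + 1 := by omega
    have h15 : (k + 1) % 15 ≠ 0 := fun h => h3 (by rw [← hm3, h]; norm_num)
    have e15 : (k + 1) / 15 = k / 15 := by omega
    rw [e3, e5, e15, triE_succ, triE_succ]
    simp only [h3, h5]
    simp only [not_true_eq_false, and_false, false_and, if_false]
    omega
  · have e3 : (k + 1) / 3 = k / 3 := by omega
    have e5 : (k + 1) / 5 = k / 5 := by omega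
    have e15 : (k + 1) / 15 = k / 15 := by omega
    rw [e3, e5, e15, triE_succ]
    simp only [h3, h5]
    simp only [not_false_eq_true, and_self, if_pos]
    omega

theorem solve_nat (n : Nat) : solve (n : Int) = F (n : Int) := by
  induction n with
  | zero =>
    simp [solve, F, triE]
  | succ m ih =>
    have hsplit : PySem.List.pyRange 1 ((m : Int) + 1 + 1) 1
        = PySem.List.pyRange 1 ((m : Int) + 1) 1 ++ [(m : Int) + 1] :=
      PySem.List.pyRange_one_succ_right (by omega)
    have hmod3 : ∀ i : Int, PySem.Int.mod i 3 = i % 3 :=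
      fun i => PySem.Int.mod_eq_emod_of_pos (by norm_num)
    have hmod5 : ∀ i : Int, PySem.Int.mod i 5 = i % 5 :=
      fun i => PySem.Int.mod_eq_emod_of_pos (by norm_num)
    unfold solve at ih ⊢
    push_cast
    rw [hsplit, List.foldl_append, ih]
    simp only [List.foldl_cons, List.foldl_nil, hmod3, hmod5]
    rw [F_succ (m : Int)]
    by_cases h3 : ((m : Int) + 1) % 3 = 0 <;> by_cases h5 : ((m : Int) + 1) % 5 = 0 <;>
      simp [h3, h5]

theorem solve_alt_eq_F (N : Int) : solve_alt N = F (if N > 0 then N else 0) := by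
  unfold solve_alt F solveTri triE
  have hn : (0:Int) ≤ if N > 0 then N else 0 := by split <;> omega
  set n : Int := if N > 0 then N else 0 with hndef
  have f3 : PySem.Int.floordiv n 3 = n / 3 := PySem.Int.floordiv_eq_ediv_of_pos (by norm_num)
  have f5 : PySem.Int.floordiv n 5 = n / 5 := PySem.Int.floordiv_eq_ediv_of_pos (by norm_num)
  have f15 : PySem.Int.floordiv n 15 = n / 15 := PySem.Int.floordiv_eq_ediv_of_pos (by norm_num)
  have f2 : ∀ m : Int, PySem.Int.floordiv m 2 = m / 2 :=
    fun m => PySem.Int.floordiv_eq_ediv_of_pos (by norm_num)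
  simp only [f3, f5, f15, f2]

-- ===== VERDICT (by name: the statement is the Claim_ definition above) =====
theorem solve_spec : Claim_equal_solve := by
  intro N _
  unfold Spec_solve
  rw [solve_alt_eq_F]
  by_cases h : N > 0
  · rw [if_pos h]
    obtain ⟨n, rfl⟩ : ∃ n : Nat, N = (n : Int) := ⟨N.toNat, (Int.toNat_of_nonneg (by omega)).symm⟩
    exact solve_nat n
  · rw [if_neg h]
    have hnil : PySem.List.pyRange 1 (N + 1) 1 = [] :=
      PySem.List.pyRange_one_eq_nil (by omega)
    simp [solve, hnil, F, triE]
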